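-- pv_equiv track=rewrite | github.com/bethwelkip/CodeBreakers | Google/min_cost.py | recursive_min_cost
-- ===== SOURCE A (Python) =====
-- def recursive_min_cost(s):
--     idxs = [i for i, ch in enumerate(s) if ch == 'b']
--
--     def recurse(cost, n, s):
--         if n == 0 or len(s) == 0:
--             return cost
--         if s[0] == 'b':
--             cost = recurse(cost+1, n-1, s[1:])
--
--         elif s[-1] == 'b':
--             cost = recurse(cost+1, n-1, s[:-1])
--         else:
--             idx = s.index('b')
--             cost = min(
--                 recurse(cost+2, n-1, s[:idx]+s[idx+1:]), recurse(cost+1, n, s[1:]))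
--         return cost
--     return recurse(0, len(idxs), s)
-- ===== SOURCE B (Python) =====
-- def recursive_min_cost(s):
--     # One backward pass. For each suffix we keep: m = number of 'b's, t = length of
--     # the trailing run of 'b's, k = suffix length, f = min cost for that suffix,
--     # using f(suffix) = 0 if m == 0 else min(2*m - t, 1 + f(shorter suffix)).
--     m = 0
--     t = 0
--     k = 0
--     f = 0
--     for c in reversed(s):
--         if c == 'b':
--             m += 1
--             if t == k:
--                 t += 1
--         k += 1
--         f = 0 if m == 0 else min(2 * m - t, 1 + f)
--     return f
-- ===== Notes on version B (the rewrite author's own statement) =====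
-- stated objective: alternative
-- what changed: Replaces A's exponentially branching recursion (which repeatedly strips end 'b's and otherwise tries both 'delete first b for 2' and 'pop head for 1') by a single backward pass over the string maintaining suffix statistics (count of 'b', trailing-'b' run length, suffix answer) via the recurrence f = 0 if m == 0 else min(2*m - t, 1 + f).
import Mathlib
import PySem

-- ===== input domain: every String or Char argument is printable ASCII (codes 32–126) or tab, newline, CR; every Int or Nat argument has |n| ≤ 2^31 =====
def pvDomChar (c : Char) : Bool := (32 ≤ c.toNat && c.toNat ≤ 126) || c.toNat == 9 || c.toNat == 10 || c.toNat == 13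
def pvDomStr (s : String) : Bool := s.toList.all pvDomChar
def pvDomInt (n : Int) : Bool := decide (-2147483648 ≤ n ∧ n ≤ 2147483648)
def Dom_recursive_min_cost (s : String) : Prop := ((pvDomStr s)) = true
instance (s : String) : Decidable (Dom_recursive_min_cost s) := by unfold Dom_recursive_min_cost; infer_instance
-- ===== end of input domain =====

-- B replaces A's exponentially branching recursion by one linear backward pass over
-- suffix statistics (count of 'b', trailing-'b' run length, suffix answer).


-- ===== PORT A =====
-- inner 'recurse(cost, n, s)' of A; n is always the number of 'b' still in s
def recurseA (cost : Int) (n : Int) (s : List Char) : Int :=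
  if h0 : n = 0 ∨ s.length = 0 then cost
  else if h1 : PySem.List.pyGet? s 0 = some 'b' then
    recurseA (cost + 1) (n - 1) (PySem.List.slice s (some 1) none)
  else if h2 : PySem.List.pyGet? s (-1) = some 'b' then
    recurseA (cost + 1) (n - 1) (PySem.List.slice s none (some (-1)))
  else
    match h : PySem.List.index? s 'b' with
    | some idx =>
        min (recurseA (cost + 2) (n - 1)
              (PySem.List.slice s none (some (idx : Int)) ++
               PySem.List.slice s (some ((idx : Int) + 1)) none))
            (recurseA (cost + 1) n (PySem.List.slice s (some 1) none))
    | none => cost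
      -- unreachable from recursive_min_cost (n = number of 'b' in s); Python raises ValueError here
termination_by s.length
decreasing_by
  · simp only [PySem.List.slice_from_one, List.length_tail]; omega
  · simp only [PySem.List.slice_to_neg_one, List.length_dropLast]; omega
  · obtain ⟨hk, -, -⟩ := PySem.List.getElem_of_index?_eq_some h
    have h1 : ((idx : Int) + 1) = ((idx + 1 : Nat) : Int) := by push_cast; ring
    rw [PySem.List.slice_to_natCast, h1, PySem.List.slice_from_natCast]
    simp only [List.length_append, List.length_take, List.length_drop]
    omega
  · simp only [PySem.List.slice_from_one, List.length_tail]; omega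

def recursive_min_cost (s : String) : Int :=
  let idxs := ((PySem.List.enumerate s.toList 0).filter (fun p => p.2 == 'b')).map (fun p => p.1)
  recurseA 0 (idxs.length : Int) s.toList

-- ===== PORT B =====
-- one step of Source B's loop body; state (m, t, k, f) as in Source B
def altStep (st : Int × Int × Int × Int) (c : Char) : Int × Int × Int × Int :=
  let m := if c = 'b' then st.1 + 1 else st.1
  let t := if c = 'b' ∧ st.2.1 = st.2.2.1 then st.2.1 + 1 else st.2.1
  let k := st.2.2.1 + 1
  let f := if m = 0 then 0 else min (2 * m - t) (1 + st.2.2.2)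
  (m, t, k, f)

def recursive_min_cost_alt (s : String) : Int :=
  (s.toList.reverse.foldl altStep (0, 0, 0, 0)).2.2.2

-- ===== PRECONDITION & SPEC =====
def Spec_recursive_min_cost (s : String) (out : Int) : Prop := out = recursive_min_cost_alt s
instance (s : String) (out : Int) : Decidable (Spec_recursive_min_cost s out) := by unfold Spec_recursive_min_cost; infer_instance

-- ===== CLAIM (what is proved, stated in full; the proofs are below) =====
def Claim_equal_recursive_min_cost : Prop := ∀ (s : String), Dom_recursive_min_cost s → Spec_recursive_min_cost s (recursive_min_cost s)

-- ===== LEMMAS AND PROOFS =====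

-- number of 'b' in l
def cntB : List Char → Nat
  | [] => 0
  | c :: l => (if c = 'b' then 1 else 0) + cntB l

-- length of the maximal trailing run of 'b'
def trailB : List Char → Nat
  | [] => 0
  | c :: l => if c = 'b' ∧ trailB l = l.length then trailB l + 1 else trailB l

-- the value both programs compute, as a head recursion
def Frec : List Char → Int
  | [] => 0
  | c :: l => if cntB (c :: l) = 0 then 0
      else min (2 * (cntB (c :: l) : Int) - (trailB (c :: l) : Int)) (1 + Frec l)

theorem cntB_le_length (l : List Char) : cntB l ≤ l.length := by
  induction l with
  | nil => simp [cntB]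
  | cons c l ih => simp only [cntB, List.length_cons]; split_ifs <;> omega

theorem trailB_le_cntB (l : List Char) : trailB l ≤ cntB l := by
  induction l with
  | nil => simp [trailB, cntB]
  | cons c l ih =>
    simp only [trailB, cntB]
    split_ifs with h h'
    · omega
    · simp [h.1] at h'
    · omega
    · omega

theorem trailB_eq_len_of_cntB_eq_len (l : List Char) (h : cntB l = l.length) :
    trailB l = l.length := by
  induction l with
  | nil => simp [trailB]
  | cons c l ih =>
    have hc := cntB_le_length l
    simp only [cntB, List.length_cons] at h
    have hcb : c = 'b' := by by_contra hne; simp [hne] at h; omega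
    have hl : cntB l = l.length := by simp [hcb] at h; omega
    simp [trailB, hcb, ih hl]

theorem getLast?_b_of_trailB_pos (l : List Char) (h : 0 < trailB l) :
    l.getLast? = some 'b' := by
  induction l with
  | nil => simp [trailB] at h
  | cons c l ih =>
    cases l with
    | nil =>
      have e : trailB [c] = if c = 'b' ∧ trailB ([] : List Char) = ([] : List Char).length then trailB ([] : List Char) + 1 else trailB ([] : List Char) := rfl
      rw [e] at h
      split_ifs at h with hc
      · simp [hc.1]
      · simp [trailB] at h
    | cons d m =>
      rw [List.getLast?_cons_cons]
      apply ih
      have e : trailB (c :: d :: m) = if c = 'b' ∧ trailB (d :: m) = (d :: m).length then trailB (d :: m) + 1 else trailB (d :: m) := rfl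
      rw [e] at h
      split_ifs at h with hc
      · have h2 := hc.2
        simp only [List.length_cons] at h2
        omega
      · exact h

theorem trailB_eq_zero_of_last_ne (l : List Char) (h : l.getLast? ≠ some 'b') :
    trailB l = 0 := by
  by_contra hne
  exact h (getLast?_b_of_trailB_pos l (by omega))

theorem Frec_nonneg (l : List Char) : 0 ≤ Frec l := by
  induction l with
  | nil => simp [Frec]
  | cons c l ih =>
    simp only [Frec]
    split_ifs with h
    · omega
    · have h1 := trailB_le_cntB (c :: l)
      have h2 : (trailB (c :: l) : Int) ≤ (cntB (c :: l) : Int) := by exact_mod_cast h1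
      omega

theorem Frec_le (l : List Char) : Frec l ≤ 2 * (cntB l : Int) - (trailB l : Int) := by
  cases l with
  | nil => simp [Frec, cntB, trailB]
  | cons c l =>
    simp only [Frec]
    split_ifs with h
    · have h1 := trailB_le_cntB (c :: l)
      rw [h] at h1
      simp [h]; omega
    · omega

theorem Frec_zero_of_cntB (l : List Char) (h : cntB l = 0) : Frec l = 0 := by
  cases l with
  | nil => simp [Frec]
  | cons c l => simp [Frec, h]

theorem cntB_append (x y : List Char) : cntB (x ++ y) = cntB x + cntB y := by
  induction x with
  | nil => simp [cntB]
  | cons c x ih => simp only [List.cons_append, cntB, ih]; omega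

theorem trailB_append_b (l : List Char) : trailB (l ++ ['b']) = trailB l + 1 := by
  induction l with
  | nil => simp [trailB]
  | cons c l ih =>
    simp only [List.cons_append, trailB, ih, List.length_append, List.length_cons,
      List.length_nil]
    by_cases hc : c = 'b'
    · simp only [hc, true_and]
      split_ifs <;> omega
    · simp [hc]

theorem Frec_append_b (l : List Char) : Frec (l ++ ['b']) = 1 + Frec l := by
  induction l with
  | nil => simp [Frec, cntB, trailB]
  | cons c l ih =>
    have hc : cntB ((c :: l) ++ ['b']) = cntB (c :: l) + 1 := by
      rw [cntB_append]; simp [cntB]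
    have ht : trailB ((c :: l) ++ ['b']) = trailB (c :: l) + 1 := trailB_append_b (c :: l)
    rw [List.cons_append] at hc ht ⊢
    simp only [Frec, hc, ht, ih]
    by_cases h0 : cntB (c :: l) = 0
    · have hf : Frec l = 0 := Frec_zero_of_cntB l (by simp only [cntB] at h0; omega)
      have ht0 : trailB (c :: l) = 0 := by have := trailB_le_cntB (c :: l); omega
      simp [h0, ht0, hf]
    · simp only [if_neg h0, if_neg (by omega : ¬(cntB (c :: l) + 1 = 0))]
      push_cast
      omega

theorem trailB_insert_le (x y : List Char) :
    trailB (x ++ y) ≤ trailB (x ++ 'b' :: y) := by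
  induction x with
  | nil =>
    have e : trailB ('b' :: y) = if 'b' = 'b' ∧ trailB y = y.length then trailB y + 1 else trailB y := rfl
    simp only [List.nil_append]
    rw [e]
    split_ifs <;> omega
  | cons c x ih =>
    have e0 : trailB (c :: (x ++ y)) = if c = 'b' ∧ trailB (x ++ y) = (x ++ y).length then trailB (x ++ y) + 1 else trailB (x ++ y) := rfl
    have e1 : trailB (c :: (x ++ 'b' :: y)) = if c = 'b' ∧ trailB (x ++ 'b' :: y) = (x ++ 'b' :: y).length then trailB (x ++ 'b' :: y) + 1 else trailB (x ++ 'b' :: y) := rfl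
    simp only [List.cons_append]
    rw [e0, e1]
    by_cases hC0 : c = 'b' ∧ trailB (x ++ y) = (x ++ y).length
    · by_cases hC1 : c = 'b' ∧ trailB (x ++ 'b' :: y) = (x ++ 'b' :: y).length
      · rw [if_pos hC0, if_pos hC1]; omega
      · exfalso
        obtain ⟨hcb, h02⟩ := hC0
        have h1' := trailB_le_cntB (x ++ y)
        have h2' := cntB_le_length (x ++ y)
        have hall : cntB (x ++ y) = (x ++ y).length := by omega
        have hall2 : cntB (x ++ 'b' :: y) = (x ++ 'b' :: y).length := by
          rw [cntB_append] at hall ⊢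
          have ecnt : cntB ('b' :: y) = 1 + cntB y := by simp [cntB]
          rw [ecnt]
          simp only [List.length_append, List.length_cons] at *
          omega
        exact hC1 ⟨hcb, trailB_eq_len_of_cntB_eq_len _ hall2⟩
    · rw [if_neg hC0]
      split_ifs <;> omega

theorem Frec_insert_le (x y : List Char) :
    Frec (x ++ 'b' :: y) ≤ 2 + Frec (x ++ y) := by
  induction x with
  | nil =>
    simp only [List.nil_append, Frec]
    have hc : ¬ (cntB ('b' :: y) = 0) := by simp [cntB]
    rw [if_neg hc]
    have := Frec_nonneg y
    calc min (2 * (cntB ('b' :: y) : Int) - (trailB ('b' :: y) : Int)) (1 + Frec y)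
        ≤ 1 + Frec y := min_le_right _ _
      _ ≤ 2 + Frec y := by omega
  | cons c x ih =>
    have eF : ∀ (a : Char) (m : List Char), Frec (a :: m) = if cntB (a :: m) = 0 then 0 else min (2 * (cntB (a :: m) : Int) - (trailB (a :: m) : Int)) (1 + Frec m) := fun _ _ => rfl
    have hc1 : cntB (c :: (x ++ 'b' :: y)) = cntB (c :: (x ++ y)) + 1 := by
      simp only [cntB, cntB_append]
      split_ifs <;> omega
    have htr := trailB_insert_le (c :: x) y
    simp only [List.cons_append] at htr ⊢
    rw [eF c (x ++ 'b' :: y), eF c (x ++ y), hc1]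
    rw [if_neg (by omega : ¬(cntB (c :: (x ++ y)) + 1 = 0))]
    by_cases h0 : cntB (c :: (x ++ y)) = 0
    · -- the shorter list has no 'b', its Frec is 0
      rw [if_pos h0]
      omega
    · rw [if_neg h0]
      have hx : Frec (x ++ 'b' :: y) ≤ 2 + Frec (x ++ y) := ih
      have htr' : (trailB (c :: (x ++ y)) : Int) ≤ (trailB (c :: (x ++ 'b' :: y)) : Int) := by
        exact_mod_cast htr
      omega

-- 'b' is in l when cntB l ≠ 0
theorem mem_of_cntB_ne (l : List Char) (h : cntB l ≠ 0) : 'b' ∈ l := by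
  induction l with
  | nil => simp [cntB] at h
  | cons c l ih =>
    simp only [cntB] at h
    by_cases hc : c = 'b'
    · simp [hc]
    · simp [hc] at h
      exact List.mem_cons_of_mem _ (ih h)

theorem Frec_cons_b (l : List Char) : Frec ('b' :: l) = 1 + Frec l := by
  have hc : cntB ('b' :: l) = cntB l + 1 := by simp [cntB]; omega
  have ht : trailB ('b' :: l) ≤ trailB l + 1 := by
    simp only [trailB]; split_ifs <;> omega
  have hF := Frec_le l
  have htc := trailB_le_cntB l
  simp only [Frec, hc]
  rw [if_neg (by omega : ¬(cntB l + 1 = 0))]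
  have : (trailB ('b' :: l) : Int) ≤ (trailB l : Int) + 1 := by exact_mod_cast ht
  push_cast
  omega

theorem getLast?_append_right' {α : Type} (xs ys : List α) (h : ys ≠ []) :
    (xs ++ ys).getLast? = ys.getLast? := by
  rw [List.getLast?_append]
  cases hgl : ys.getLast? with
  | none => exact absurd (List.getLast?_eq_none_iff.mp hgl) h
  | some z => simp

theorem main_lemma : ∀ (N : Nat) (l : List Char), l.length ≤ N → ∀ cost : Int,
    recurseA cost (cntB l : Int) l = cost + Frec l := by
  intro N
  induction N with
  | zero =>
    intro l hl cost
    have : l = [] := List.length_eq_zero_iff.mp (by omega)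
    subst this
    rw [recurseA]
    simp [cntB, Frec]
  | succ N ih =>
    intro l hl cost
    by_cases h0 : (cntB l : Int) = 0 ∨ l.length = 0
    · rw [recurseA, dif_pos h0]
      have hc0 : cntB l = 0 := by
        rcases h0 with h | h
        · exact_mod_cast h
        · have := cntB_le_length l; omega
      rw [Frec_zero_of_cntB l hc0]; ring
    · push_neg at h0
      obtain ⟨hn0, hlen0⟩ := h0
      obtain ⟨c, l', rfl⟩ : ∃ c l', l = c :: l' := by
        cases l with
        | nil => simp at hlen0
        | cons c l' => exact ⟨c, l', rfl⟩
      rw [recurseA, dif_neg (by push_neg; exact ⟨hn0, hlen0⟩)]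
      by_cases hcb : c = 'b'
      · -- first branch
        subst hcb
        rw [dif_pos (by simp [PySem.List.pyGet?_zero_cons])]
        rw [PySem.List.slice_from_one]
        simp only [List.tail_cons]
        have hc : cntB ('b' :: l') = cntB l' + 1 := by simp [cntB]; omega
        have harg : (cntB ('b' :: l') : Int) - 1 = (cntB l' : Int) := by rw [hc]; push_cast; ring
        rw [harg, ih l' (by simp at hl; omega)]
        rw [Frec_cons_b]
        ring
      · rw [dif_neg (by simp [hcb])]
        by_cases hlast : (c :: l').getLast? = some 'b'
        · -- second branch
          rw [dif_pos (by rw [PySem.List.pyGet?_neg_one]; exact hlast)]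
          rw [PySem.List.slice_to_neg_one]
          have hne : (c :: l') ≠ [] := by simp
          have hdec : (c :: l').dropLast ++ ['b'] = c :: l' := by
            have h1 := List.dropLast_append_getLast hne
            have h2 : (c :: l').getLast hne = 'b' := by
              have := List.getLast?_eq_getLast (l := c :: l') hne
              rw [hlast] at this
              exact (Option.some_injective _ this.symm)
            rw [h2] at h1
            exact h1
          have hcnt : cntB ((c :: l').dropLast) + 1 = cntB (c :: l') := by
            conv_rhs => rw [← hdec]
            rw [cntB_append]; simp [cntB]
          have harg : (cntB (c :: l') : Int) - 1 = (cntB (c :: l').dropLast : Int) := by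
            rw [← hcnt]; push_cast; ring
          rw [harg, ih _ (by simp [List.length_dropLast] at *; omega)]
          conv_rhs => rw [← hdec]
          rw [Frec_append_b]
          ring
        · -- else branch
          rw [dif_neg (by rw [PySem.List.pyGet?_neg_one]; exact hlast)]
          have hmem : 'b' ∈ (c :: l') := mem_of_cntB_ne _ (by exact_mod_cast hn0)
          split
          · rename_i idx hidx
            obtain ⟨pre, suf, hsplit, hlenp, hnotin⟩ := (PySem.List.index?_eq_some_iff (xs := c :: l') (v := 'b') (k := idx)).mp hidx
            -- the two slices
            have hslice1 : PySem.List.slice (c :: l') none (some (idx : Int)) = pre := by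
              rw [PySem.List.slice_to_natCast, hsplit, ← hlenp, List.take_left]
            have hslice2 : PySem.List.slice (c :: l') (some ((idx : Int) + 1)) none = suf := by
              have h1 : ((idx : Int) + 1) = ((idx + 1 : Nat) : Int) := by push_cast; ring
              rw [h1, PySem.List.slice_from_natCast, hsplit, ← hlenp]
              rw [show pre ++ 'b' :: suf = (pre ++ ['b']) ++ suf by simp]
              rw [show pre.length + 1 = (pre ++ ['b']).length by simp]
              exact List.drop_left
            rw [hslice1, hslice2, PySem.List.slice_from_one]
            simp only [List.tail_cons]
            -- pre is nonempty and starts with c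
            obtain ⟨x', rfl⟩ : ∃ x', pre = c :: x' := by
              cases pre with
              | nil => simp at hsplit; exact absurd hsplit.1 hcb
              | cons d x' =>
                simp only [List.cons_append, List.cons.injEq] at hsplit
                exact ⟨x', by rw [hsplit.1]⟩
            have hl' : l' = x' ++ 'b' :: suf := by
              simpa using hsplit
            -- counts
            have hbpre : 'b' ∉ x' := fun hx => hnotin (List.mem_cons_of_mem _ hx)
            have hcx : cntB (c :: x') = cntB x' := by simp [cntB, hcb]
            have hcnt1 : cntB (c :: x' ++ suf) + 1 = cntB (c :: l') := by
              rw [hl']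
              simp only [List.cons_append, cntB, cntB_append]
              simp [cntB]; omega
            have harg1 : (cntB (c :: l') : Int) - 1 = (cntB (c :: x' ++ suf) : Int) := by
              rw [← hcnt1]; push_cast; ring
            have hcnt2 : cntB l' = cntB (c :: l') := by simp [cntB, hcb]
            have harg2 : (cntB (c :: l') : Int) = (cntB l' : Int) := by rw [hcnt2]
            -- lengths for IH
            have hlx : (c :: x' ++ suf).length ≤ N := by
              have : (c :: l').length ≤ N + 1 := hl
              rw [hl'] at this
              simp only [List.length_cons, List.length_append] at *
              omega
            have hly : l'.length ≤ N := by simp at hl; omega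
            rw [harg1, ih _ hlx, harg2, ih _ hly]
            -- suf is nonempty (last of l is not 'b')
            obtain ⟨d, suf', rfl⟩ : ∃ d suf', suf = d :: suf' := by
              cases suf with
              | nil =>
                exfalso
                apply hlast
                rw [hsplit, show c :: x' ++ ['b'] = (c :: x') ++ ['b'] from rfl,
                  getLast?_append_right' _ _ (by simp)]
                simp
              | cons d suf' => exact ⟨d, suf', rfl⟩
            -- trailing-run facts
            have htr0 : trailB (c :: l') = 0 := trailB_eq_zero_of_last_ne _ hlast
            have hlast2 : (c :: x' ++ 'b' :: d :: suf').getLast? = (d :: suf').getLast? := by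
              rw [show c :: x' ++ 'b' :: d :: suf' = (c :: x' ++ ['b']) ++ d :: suf' by simp]
              exact getLast?_append_right' _ _ (by simp)
            have hlast3 : (c :: x' ++ d :: suf').getLast? = (d :: suf').getLast? :=
              getLast?_append_right' (c :: x') _ (by simp)
            have hlastl : (c :: l').getLast? = (d :: suf').getLast? := by
              rw [hsplit]
              simpa using hlast2
            have htr1 : trailB (c :: x' ++ d :: suf') = 0 := by
              apply trailB_eq_zero_of_last_ne
              rw [hlast3, ← hlastl]
              exact hlast
            -- the arithmetic core
            have hFb := Frec_le (c :: x' ++ d :: suf')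
            have hins : Frec (x' ++ 'b' :: d :: suf') ≤ 2 + Frec (x' ++ d :: suf') :=
              Frec_insert_le x' (d :: suf')
            -- Frec of the full list, unfolded
            have hFl : Frec (c :: l') =
                min (2 * (cntB (c :: l') : Int) - (trailB (c :: l') : Int)) (1 + Frec l') := by
              rw [Frec, if_neg (by exact_mod_cast hn0)]
            rw [hFl, htr0]
            -- key inequality: 2 + Frec (c :: x' ++ suf) ≥ min (2m) (1 + Frec l')
            have hkey : min (2 * (cntB (c :: l') : Int)) (1 + Frec l') ≤ 2 + Frec (c :: x' ++ d :: suf') := by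
              by_cases hz : cntB (c :: x' ++ d :: suf') = 0
              · have hf0 : Frec (c :: x' ++ d :: suf') = 0 := Frec_zero_of_cntB _ hz
                have hm1 : cntB (c :: l') = 1 := by omega
                omega
              · have hFx : Frec (c :: x' ++ d :: suf') =
                    min (2 * (cntB (c :: x' ++ d :: suf') : Int) - (trailB (c :: x' ++ d :: suf') : Int))
                        (1 + Frec (x' ++ d :: suf')) := by
                  rw [show c :: x' ++ d :: suf' = c :: (x' ++ d :: suf') by simp, Frec]
                  rw [if_neg (by simpa using hz)]
                rw [hFx, htr1]
                have hc1 : (cntB (c :: x' ++ d :: suf') : Int) = (cntB (c :: l') : Int) - 1 := by omega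
                rw [hl'] at hc1
                rw [hl']
                omega
            have hml : Frec (c :: x' ++ d :: suf') ≤ 2 * ((cntB (c :: l') : Int)) - 2 := by
              have := trailB_le_cntB (c :: x' ++ d :: suf')
              have h2 : (trailB (c :: x' ++ d :: suf') : Int) = 0 := by exact_mod_cast htr1
              omega
            omega

          · rename_i heq
            exact absurd hmem ((PySem.List.index?_eq_none_iff _ _).mp heq)
-- length of the idxs list is cntB
theorem idxs_length (l : List Char) : ∀ s0 : Int,
    (((PySem.List.enumerate l s0).filter (fun p => p.2 == 'b')).map (fun p => p.1)).length = cntB l := by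
  induction l with
  | nil => intro s0; simp [PySem.List.enumerate_nil, cntB]
  | cons c l ih =>
    intro s0
    rw [PySem.List.enumerate_cons]
    by_cases hc : c = 'b'
    · simp only [List.filter_cons, hc]
      simp [cntB, ih (s0 + 1)]
      omega
    · simp only [List.filter_cons]
      simp [cntB, hc, ih (s0 + 1)]

-- B's fold computes the suffix statistics
theorem foldl_state (l : List Char) :
    l.reverse.foldl altStep (0, 0, 0, 0) =
      ((cntB l : Int), (trailB l : Int), (l.length : Int), Frec l) := by
  induction l with
  | nil => simp [cntB, trailB, Frec]
  | cons c l ih =>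
    rw [List.reverse_cons, List.foldl_append, ih]
    have eF : Frec (c :: l) = if cntB (c :: l) = 0 then 0 else min (2 * (cntB (c :: l) : Int) - (trailB (c :: l) : Int)) (1 + Frec l) := rfl
    have eT : trailB (c :: l) = if c = 'b' ∧ trailB l = l.length then trailB l + 1 else trailB l := rfl
    have eC : cntB (c :: l) = (if c = 'b' then 1 else 0) + cntB l := rfl
    have hm : (if c = 'b' then (cntB l : Int) + 1 else (cntB l : Int)) = (cntB (c :: l) : Int) := by
      rw [eC]; split_ifs <;> push_cast <;> omega
    have htt : (if c = 'b' ∧ (trailB l : Int) = (l.length : Int) then (trailB l : Int) + 1 else (trailB l : Int)) = (trailB (c :: l) : Int) := by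
      rw [eT]
      by_cases h1 : c = 'b' ∧ trailB l = l.length
      · rw [if_pos h1, if_pos ⟨h1.1, by exact_mod_cast h1.2⟩]; push_cast; ring
      · rw [if_neg h1, if_neg (fun hh => h1 ⟨hh.1, by exact_mod_cast hh.2⟩)]
    have hf : (if (cntB (c :: l) : Int) = 0 then (0 : Int) else min (2 * (cntB (c :: l) : Int) - (trailB (c :: l) : Int)) (1 + Frec l)) = Frec (c :: l) := by
      rw [eF]
      by_cases h0 : cntB (c :: l) = 0
      · rw [if_pos h0, if_pos (by exact_mod_cast h0)]
      · rw [if_neg h0, if_neg (by exact_mod_cast h0 : ¬((cntB (c :: l) : Int) = 0))]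
    simp only [List.foldl_cons, List.foldl_nil, altStep]
    rw [hm, htt, hf]
    push_cast
    rfl

-- ===== VERDICT (by name: the statement is the Claim_ definition above) =====
theorem recursive_min_cost_spec : Claim_equal_recursive_min_cost := by
  intro s _
  unfold Spec_recursive_min_cost recursive_min_cost recursive_min_cost_alt
  rw [foldl_state]
  simp only [idxs_length]
  rw [main_lemma (s.toList.length) s.toList le_rfl 0]
  ring
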